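-- pv_equiv track=rewrite | github.com/TimaxHack/telegram-parser | index.py | is_valid_media_extension
-- ===== SOURCE A (Python) =====
-- def is_valid_media_extension(media_path, filters):
--     if not media_path:
--         return True
--
--     if not filters["filter_message_types"]:
--         return True
--
--     for ext in filters["filter_message_types"]:
--         if ext in ["jpg", "jpeg", "png", "gif", "mp4", "mov", "avi", "pdf", "doc", "docx", "txt"] and media_path.endswith(ext):
--             return True
--
--     if "photo" in filters["filter_message_types"] and media_path.endswith(("jpg", "jpeg", "png", "gif")):
--         return True
--     if "video" in filters["filter_message_types"] and media_path.endswith(("mp4", "mov", "avi")):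
--         return True
--     if "document" in filters["filter_message_types"] and media_path.endswith(("pdf", "doc", "docx", "txt")):
--         return True
--
--     return False
-- ===== SOURCE B (Python) =====
-- SUFFIX_OWNERS = {
--     "jpg": "photo", "jpeg": "photo", "png": "photo", "gif": "photo",
--     "mp4": "video", "mov": "video", "avi": "video",
--     "pdf": "document", "doc": "document", "docx": "document", "txt": "document",
-- }
--
-- def is_valid_media_extension(media_path, filters):
--     if not media_path:
--         return True
--     types = filters["filter_message_types"]
--     if not types:
--         return True
--     type_set = set(types)
--     return any(media_path.endswith(ext) and (ext in type_set or owner in type_set)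
--                for ext, owner in SUFFIX_OWNERS.items())
-- ===== Notes on version B (the rewrite author's own statement) =====
-- stated objective: alternative
-- what changed: B inverts the traversal: instead of scanning the filter list and then testing three keyword branches each with its own endswith calls, it makes one pass over a fixed suffix-to-owner-keyword table, accepting when the path ends with the suffix and either the suffix itself or its owning keyword is in the set of filter types.
import Mathlib
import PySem

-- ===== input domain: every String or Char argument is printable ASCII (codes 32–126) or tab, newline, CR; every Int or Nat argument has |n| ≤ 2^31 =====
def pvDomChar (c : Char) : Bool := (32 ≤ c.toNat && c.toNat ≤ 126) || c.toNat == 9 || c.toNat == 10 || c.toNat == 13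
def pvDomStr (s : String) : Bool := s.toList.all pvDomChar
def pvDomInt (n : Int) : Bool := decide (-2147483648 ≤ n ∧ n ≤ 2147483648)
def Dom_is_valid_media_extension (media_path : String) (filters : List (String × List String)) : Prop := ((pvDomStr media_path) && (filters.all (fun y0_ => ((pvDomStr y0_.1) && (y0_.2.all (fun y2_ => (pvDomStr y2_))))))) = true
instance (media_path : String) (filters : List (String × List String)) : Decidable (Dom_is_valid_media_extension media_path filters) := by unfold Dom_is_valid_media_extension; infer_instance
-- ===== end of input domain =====

-- B inverts A's traversal: instead of scanning the filter list against the path, it scans the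
-- fixed 11-entry suffix→keyword ownership table once, accepting a suffix the path carries when
-- the suffix itself or its owning keyword is in the set of filter types (objective: alternative).

-- shared helper: filters["filter_message_types"] — first-match association-list lookup
def pvLookupFMT : List (String × List String) → Option (List String)
  | [] => none
  | p :: rest => if p.1 = "filter_message_types" then some p.2 else pvLookupFMT rest

-- ===== PORT A =====
def pvKnownExts : List String := ["jpg","jpeg","png","gif","mp4","mov","avi","pdf","doc","docx","txt"]

def is_valid_media_extension (media_path : String) (filters : List (String × List String)) : Bool :=
  if media_path = "" then true
  else
    match pvLookupFMT filters with
    | none => false   -- Python raises KeyError here; excluded by Pre_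
    | some types =>
      if types = [] then true
      else if types.any (fun ext => pvKnownExts.contains ext && PySem.Str.endswith media_path ext) then true
      else if types.contains "photo" && (["jpg","jpeg","png","gif"] : List String).any (fun e => PySem.Str.endswith media_path e) then true
      else if types.contains "video" && (["mp4","mov","avi"] : List String).any (fun e => PySem.Str.endswith media_path e) then true
      else if types.contains "document" && (["pdf","doc","docx","txt"] : List String).any (fun e => PySem.Str.endswith media_path e) then true
      else false

-- ===== PORT B =====
def pvSuffixOwners : List (String × String) :=
  [("jpg","photo"),("jpeg","photo"),("png","photo"),("gif","photo"),
   ("mp4","video"),("mov","video"),("avi","video"),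
   ("pdf","document"),("doc","document"),("docx","document"),("txt","document")]

def is_valid_media_extension_alt (media_path : String) (filters : List (String × List String)) : Bool :=
  if media_path = "" then true
  else
    match pvLookupFMT filters with
    | none => false   -- Python raises KeyError here; excluded by Pre_
    | some types =>
      if types = [] then true
      else
        let typeSet : PySem.Set String := PySem.Set.ofList types
        pvSuffixOwners.any (fun p =>
          PySem.Str.endswith media_path p.1 && (typeSet.contains p.1 || typeSet.contains p.2))

-- ===== PRECONDITION & SPEC =====
-- Pre_ excludes only the inputs on which Python A raises KeyError: a non-empty media_path with
-- no "filter_message_types" key in filters.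
def Pre_is_valid_media_extension (media_path : String) (filters : List (String × List String)) : Prop :=
  media_path = "" ∨ "filter_message_types" ∈ filters.map Prod.fst
instance (media_path : String) (filters : List (String × List String)) : Decidable (Pre_is_valid_media_extension media_path filters) := by unfold Pre_is_valid_media_extension; infer_instance

def pvWitness_is_valid_media_extension : String × (List (String × List String)) :=
  ("a.jpg", [("filter_message_types", ["photo"])])

def Spec_is_valid_media_extension (media_path : String) (filters : List (String × List String)) (out : Bool) : Prop := out = is_valid_media_extension_alt media_path filters
instance (media_path : String) (filters : List (String × List String)) (out : Bool) : Decidable (Spec_is_valid_media_extension media_path filters out) := by unfold Spec_is_valid_media_extension; infer_instance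

-- ===== CLAIM =====
def Claim_equal_is_valid_media_extension : Prop := ∀ (media_path : String) (filters : List (String × List String)), Dom_is_valid_media_extension media_path filters → Pre_is_valid_media_extension media_path filters → Spec_is_valid_media_extension media_path filters (is_valid_media_extension media_path filters)

-- ===== LEMMAS AND PROOFS =====

theorem pvLookupFMT_some (filters : List (String × List String))
    (h : "filter_message_types" ∈ filters.map Prod.fst) :
    ∃ ts, pvLookupFMT filters = some ts := by
  induction filters with
  | nil => simp at h
  | cons p rest ih =>
    by_cases hp : p.1 = "filter_message_types"
    · exact ⟨p.2, by simp [pvLookupFMT, hp]⟩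
    · simp [List.map_cons] at h
      rcases h with h | h
      · exact absurd h.symm hp
      · obtain ⟨ts, hts⟩ := ih (by simpa using h)
        exact ⟨ts, by simp [pvLookupFMT, hp, hts]⟩

theorem pv_ofList_contains (l : List String) (x : String) :
    (PySem.Set.ofList l).contains x = l.contains x := by
  rw [Bool.eq_iff_iff]
  simp [PySem.Set.mem_ofList]

-- exchanging the scanned list: ∃x∈l, x∈m ∧ p x  ↔  ∃y∈m, p y ∧ y∈l
theorem pv_swap_any (l m : List String) (p : String → Bool) :
    l.any (fun x => m.contains x && p x) = m.any (fun y => p y && l.contains y) := by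
  rw [Bool.eq_iff_iff]
  simp only [List.any_eq_true, Bool.and_eq_true, List.contains_eq_mem, decide_eq_true_eq]
  constructor
  · rintro ⟨x, hx, hm, hp⟩; exact ⟨x, hm, hp, hx⟩
  · rintro ⟨y, hy, hp, hl⟩; exact ⟨y, hl, hy, hp⟩

theorem pv_if_true_or (a : Bool) (x : Bool) : (if a = true then true else x) = (a || x) := by
  cases a <;> simp

theorem pv_any_or {α : Type} (l : List α) (f g : α → Bool) :
    (l.any fun x => f x || g x) = (l.any f || l.any g) := by
  induction l with
  | nil => rfl
  | cons a l ih =>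
    simp only [List.any_cons, ih]
    cases f a <;> cases g a <;> simp

-- ===== VERDICT =====
theorem is_valid_media_extension_spec : Claim_equal_is_valid_media_extension := by
  intro mp filters _ hpre
  unfold Spec_is_valid_media_extension is_valid_media_extension is_valid_media_extension_alt
  by_cases hmp : mp = ""
  · simp [hmp]
  · simp only [if_neg hmp]
    rcases hpre with h | h
    · exact absurd h hmp
    · obtain ⟨ts, hts⟩ := pvLookupFMT_some filters h
      rw [hts]
      by_cases he : ts = []
      · simp [he]
      · simp only [if_neg he]
        rw [pv_if_true_or, pv_if_true_or, pv_if_true_or, pv_if_true_or]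
        rw [pv_swap_any]
        simp only [Bool.and_or_distrib_left, pv_any_or, pv_ofList_contains]
        simp only [pvSuffixOwners, pvKnownExts, List.any_cons, List.any_nil]
        cases hP : ts.contains "photo" <;> cases hV : ts.contains "video" <;>
          cases hD : ts.contains "document" <;>
          simp [Bool.or_assoc]
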